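-- pv_equiv track=rewrite | github.com/kalwar/Codility | Gallium2018.py | solution
-- ===== SOURCE A (Python) =====
-- from collections import defaultdict
--
-- def pows(n):
--     two = 0
--     while n and n % 2 == 0:
--         n //= 2
--         two += 1
--
--     five = 0
--     while n and n % 5 == 0:
--         n //= 5
--         five += 1
--
--     return (two, five)
--
-- def solution(A):
--     seen = defaultdict(int)
--     seen2 = defaultdict(int)
--     seen3 = defaultdict(int)
--     for a, b in map(pows, A):
--         for i, v in seen2.items():
--             seen3[i + a] = max(seen3[i + a], seen2[i] + b)
--         for i, v in seen.items():
--             seen2[i + a] = max(seen2[i + a], seen[i] + b)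
--         for i in range(a+1):
--             seen[i] = max(seen[i], b)
--
--     res = 0
--     for i, v in seen3.items():
--         res = max(res, min(i, v))
--     return res
-- ===== SOURCE B (Python) =====
-- def pows(n):
--     two = 0
--     while n and n % 2 == 0:
--         n //= 2
--         two += 1
--
--     five = 0
--     while n and n % 5 == 0:
--         n //= 5
--         five += 1
--
--     return (two, five)
--
-- def best1(p, q, ps):
--     # best over triples (p, q, r) with r drawn from ps
--     if not ps:
--         return 0
--     r, rest = ps[0], ps[1:]
--     t = p[0] + q[0] + r[0]
--     f = p[1] + q[1] + r[1]
--     return max(min(t, f), best1(p, q, rest))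
--
-- def best2(p, ps):
--     # best over triples (p, q, r) with q, r drawn in order from ps
--     if not ps:
--         return 0
--     q, rest = ps[0], ps[1:]
--     return max(best1(p, q, rest), best2(p, rest))
--
-- def best3(ps):
--     # best over all triples drawn in order from ps
--     if not ps:
--         return 0
--     p, rest = ps[0], ps[1:]
--     return max(best2(p, rest), best3(rest))
--
-- def solution(A):
--     return best3([pows(x) for x in A])
-- ===== Notes on version B (the rewrite author's own statement) =====
-- stated objective: simpler
-- what changed: Replaced A's incremental three-dictionary DP (with slack keys over twos-counts) by a direct recursive enumeration of all ordered 3-element combinations of the (twos, fives) pairs, taking the max of min(sum twos, sum fives).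
import Mathlib
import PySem

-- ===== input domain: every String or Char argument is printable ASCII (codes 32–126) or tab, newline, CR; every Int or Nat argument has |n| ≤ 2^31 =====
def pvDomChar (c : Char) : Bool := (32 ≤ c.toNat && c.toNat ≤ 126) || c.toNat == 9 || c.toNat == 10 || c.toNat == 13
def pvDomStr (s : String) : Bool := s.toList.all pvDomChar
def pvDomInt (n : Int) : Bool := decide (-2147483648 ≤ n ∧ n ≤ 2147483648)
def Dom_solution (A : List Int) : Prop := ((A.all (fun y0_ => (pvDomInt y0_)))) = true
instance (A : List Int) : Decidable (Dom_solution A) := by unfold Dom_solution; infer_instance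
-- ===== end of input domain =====

-- B replaces A's three-dictionary DP by a direct recursive enumeration of all 3-element
-- combinations of (twos, fives) pairs; objective: simpler (not faster).

-- ===== PORT A =====
-- pows: the two while-loops, counting factors of 2 then of 5
def powsTwo (n two : Int) : Int × Int :=
  if h : n ≠ 0 ∧ PySem.Int.mod n 2 = 0 then
    powsTwo (PySem.Int.floordiv n 2) (two + 1)
  else (n, two)
termination_by n.natAbs
decreasing_by
  obtain ⟨h1, h2⟩ := h
  rw [PySem.Int.mod_eq_emod_of_pos (by norm_num)] at h2
  rw [PySem.Int.floordiv_eq_ediv_of_pos (by norm_num)]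
  omega

def powsFive (n five : Int) : Int × Int :=
  if h : n ≠ 0 ∧ PySem.Int.mod n 5 = 0 then
    powsFive (PySem.Int.floordiv n 5) (five + 1)
  else (n, five)
termination_by n.natAbs
decreasing_by
  obtain ⟨h1, h2⟩ := h
  rw [PySem.Int.mod_eq_emod_of_pos (by norm_num)] at h2
  rw [PySem.Int.floordiv_eq_ediv_of_pos (by norm_num)]
  omega

def pows (n : Int) : Int × Int :=
  let r2 := powsTwo n 0
  let r5 := powsFive r2.1 0
  (r2.2, r5.2)

-- the body of A's 'for a, b in map(pows, A)' loop: update seen3 from seen2, seen2 from seen,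
-- then seen for all i in range(a+1); each update reads the OLD dicts, exactly as Python does
def solStep (st : PySem.Dict Int Int × PySem.Dict Int Int × PySem.Dict Int Int)
    (p : Int × Int) : PySem.Dict Int Int × PySem.Dict Int Int × PySem.Dict Int Int :=
  ( (PySem.List.pyRange 0 (p.1 + 1) 1).foldl
      (fun t i => t.insert i (max (t.getD i 0) p.2)) st.1,
    st.1.items.foldl
      (fun t kv => t.insert (kv.1 + p.1) (max (t.getD (kv.1 + p.1) 0) (st.1.getD kv.1 0 + p.2))) st.2.1,
    st.2.1.items.foldl
      (fun t kv => t.insert (kv.1 + p.1) (max (t.getD (kv.1 + p.1) 0) (st.2.1.getD kv.1 0 + p.2))) st.2.2 )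

def solution (A : List Int) : Int :=
  let st := (A.map pows).foldl solStep (PySem.Dict.empty, PySem.Dict.empty, PySem.Dict.empty)
  st.2.2.items.foldl (fun res kv => max res (min kv.1 kv.2)) 0

-- ===== PORT B =====
def best1 (p q : Int × Int) (ps : List (Int × Int)) : Int :=
  match ps with
  | [] => 0
  | r :: rest => max (min (p.1 + q.1 + r.1) (p.2 + q.2 + r.2)) (best1 p q rest)

def best2 (p : Int × Int) (ps : List (Int × Int)) : Int :=
  match ps with
  | [] => 0
  | q :: rest => max (best1 p q rest) (best2 p rest)

def best3 (ps : List (Int × Int)) : Int :=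
  match ps with
  | [] => 0
  | p :: rest => max (best2 p rest) (best3 rest)

def solution_alt (A : List Int) : Int :=
  best3 (A.map pows)

-- ===== PRECONDITION & SPEC =====
def Spec_solution (A : List Int) (out : Int) : Prop := out = solution_alt A
instance (A : List Int) (out : Int) : Decidable (Spec_solution A out) := by unfold Spec_solution; infer_instance

-- ===== CLAIM (what is proved, stated in full; the proofs are below) =====
def Claim_equal_solution : Prop := ∀ (A : List Int), Dom_solution A → Spec_solution A (solution A)

-- ===== LEMMAS AND PROOFS =====

lemma powsTwo_counter_le (n two : Int) : two ≤ (powsTwo n two).2 := by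
  generalize hm : n.natAbs = m
  induction m using Nat.strong_induction_on generalizing n two with
  | _ m ih =>
    subst hm
    rw [powsTwo]
    split
    next h =>
      obtain ⟨h1, h2⟩ := h
      rw [PySem.Int.mod_eq_emod_of_pos (by norm_num)] at h2
      have hlt : (PySem.Int.floordiv n 2).natAbs < n.natAbs := by
        rw [PySem.Int.floordiv_eq_ediv_of_pos (by norm_num)]; omega
      exact le_trans (by omega) (ih _ hlt _ _ rfl)
    next => exact le_refl two

lemma powsFive_counter_le (n five : Int) : five ≤ (powsFive n five).2 := by
  generalize hm : n.natAbs = m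
  induction m using Nat.strong_induction_on generalizing n five with
  | _ m ih =>
    subst hm
    rw [powsFive]
    split
    next h =>
      obtain ⟨h1, h2⟩ := h
      rw [PySem.Int.mod_eq_emod_of_pos (by norm_num)] at h2
      have hlt : (PySem.Int.floordiv n 5).natAbs < n.natAbs := by
        rw [PySem.Int.floordiv_eq_ediv_of_pos (by norm_num)]; omega
      exact le_trans (by omega) (ih _ hlt _ _ rfl)
    next => exact le_refl five

lemma pows_nonneg (n : Int) : 0 ≤ (pows n).1 ∧ 0 ≤ (pows n).2 :=
  ⟨powsTwo_counter_le n 0, powsFive_counter_le (powsTwo n 0).1 0⟩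

-- generic lemmas about A's insert-max loops (all three inner loops have this shape)
lemma foldMax_mono {α : Type} (key val : α → Int) (L : List α)
    (acc : PySem.Dict Int Int) (k v : Int) (h : acc.get? k = some v) :
    ∃ v', (L.foldl (fun t x => t.insert (key x) (max (t.getD (key x) 0) (val x))) acc).get? k
      = some v' ∧ v ≤ v' := by
  induction L generalizing acc v with
  | nil => exact ⟨v, h, le_refl v⟩
  | cons x L ih =>
      simp only [List.foldl_cons]
      by_cases hk : k = key x
      · have hgd : acc.getD (key x) 0 = v := PySem.Dict.getD_of_get?_eq_some acc 0 (hk ▸ h)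
        have h1 : (acc.insert (key x) (max (acc.getD (key x) 0) (val x))).get? k
            = some (max (acc.getD (key x) 0) (val x)) := by
          rw [hk]; exact PySem.Dict.get?_insert_self _ _ _
        obtain ⟨v', h', hle⟩ := ih _ _ h1
        exact ⟨v', h', by rw [hgd] at hle; omega⟩
      · have h1 : (acc.insert (key x) (max (acc.getD (key x) 0) (val x))).get? k
            = acc.get? k := PySem.Dict.get?_insert_of_ne _ _ hk
        exact ih _ _ (h1.trans h)

lemma foldMax_hit {α : Type} (key val : α → Int) (L : List α)
    (acc : PySem.Dict Int Int) (x : α) (hx : x ∈ L) :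
    ∃ v', (L.foldl (fun t x => t.insert (key x) (max (t.getD (key x) 0) (val x))) acc).get? (key x)
      = some v' ∧ val x ≤ v' := by
  induction L generalizing acc with
  | nil => cases hx
  | cons y L ih =>
      simp only [List.foldl_cons]
      rcases List.mem_cons.mp hx with rfl | hx'
      · have h1 : (acc.insert (key x) (max (acc.getD (key x) 0) (val x))).get? (key x)
            = some (max (acc.getD (key x) 0) (val x)) := PySem.Dict.get?_insert_self _ _ _
        obtain ⟨v', h', hle⟩ := foldMax_mono key val L _ (key x) _ h1
        exact ⟨v', h', le_trans (le_max_right _ _) hle⟩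
      · exact ih _ hx'

lemma foldMax_sound {α : Type} (key val : α → Int) (L : List α)
    (acc : PySem.Dict Int Int) (P : Int → Int → Prop)
    (hmax : ∀ k v w, P k v → P k w → P k (max v w))
    (hacc : ∀ k v, acc.get? k = some v → P k v)
    (hL : ∀ x ∈ L, P (key x) (val x))
    (hnn : ∀ x ∈ L, 0 ≤ val x) :
    ∀ k v, (L.foldl (fun t x => t.insert (key x) (max (t.getD (key x) 0) (val x))) acc).get? k
      = some v → P k v := by
  induction L generalizing acc hacc with
  | nil => exact hacc
  | cons x L ih =>
      simp only [List.foldl_cons]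
      have hacc' : ∀ k v,
          (acc.insert (key x) (max (acc.getD (key x) 0) (val x))).get? k = some v → P k v := by
        intro k v hkv
        rw [PySem.Dict.get?_insert] at hkv
        split_ifs at hkv with hk
        · rcases hw : acc.get? (key x) with _ | w
          · rw [PySem.Dict.getD_of_get?_eq_none acc 0 hw] at hkv
            injection hkv with hkv'
            have h0 : 0 ≤ val x := hnn x List.mem_cons_self
            have hv : v = val x := by omega
            rw [hk, hv]
            exact hL x List.mem_cons_self
          · rw [PySem.Dict.getD_of_get?_eq_some acc 0 hw] at hkv
            injection hkv with hkv'
            rw [hk, ← hkv']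
            exact hmax _ _ _ (hacc _ _ hw) (hL x List.mem_cons_self)
        · exact hacc k v hkv
      exact ih _ hacc' (fun y hy => hL y (List.mem_cons_of_mem x hy))
        (fun y hy => hnn y (List.mem_cons_of_mem x hy))

-- sublist-of-concat inversion
lemma pair_sublist_concat {α : Type} {p q e : α} {ps : List α}
    (h : [p, q].Sublist (ps ++ [e])) : [p, q].Sublist ps ∨ (p ∈ ps ∧ q = e) := by
  rcases List.sublist_append_iff.mp h with ⟨x, y, hxy, hx, hy⟩
  rcases List.sublist_singleton.mp hy with rfl | rfl
  · rw [List.append_nil] at hxy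
    subst hxy
    exact Or.inl hx
  · rcases x with _ | ⟨a, _ | ⟨b, x⟩⟩
    · simp at hxy
    · obtain ⟨rfl, rfl⟩ : p = a ∧ q = e := by simpa using hxy
      exact Or.inr ⟨List.singleton_sublist.mp hx, rfl⟩
    · simp at hxy

lemma triple_sublist_concat {α : Type} {p q r e : α} {ps : List α}
    (h : [p, q, r].Sublist (ps ++ [e])) :
    [p, q, r].Sublist ps ∨ ([p, q].Sublist ps ∧ r = e) := by
  rcases List.sublist_append_iff.mp h with ⟨x, y, hxy, hx, hy⟩
  rcases List.sublist_singleton.mp hy with rfl | rfl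
  · rw [List.append_nil] at hxy
    subst hxy
    exact Or.inl hx
  · rcases x with _ | ⟨a, _ | ⟨b, _ | ⟨c, x⟩⟩⟩
    · simp at hxy
    · simp at hxy
    · obtain ⟨rfl, rfl, rfl⟩ : p = a ∧ q = b ∧ r = e := by simpa using hxy
      exact Or.inr ⟨hx, rfl⟩
    · simp at hxy

-- the invariant carried through A's main loop over the processed prefix ps
def DInv (ps : List (Int × Int)) (s1 s2 s3 : PySem.Dict Int Int) : Prop :=
  s1.keys.Nodup ∧ s2.keys.Nodup ∧ s3.keys.Nodup ∧
  (∀ k v, s1.get? k = some v → ∃ p, p ∈ ps ∧ k ≤ p.1 ∧ v = p.2) ∧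
  (∀ k v, s2.get? k = some v →
      ∃ p q, [p, q].Sublist ps ∧ k ≤ p.1 + q.1 ∧ v = p.2 + q.2) ∧
  (∀ k v, s3.get? k = some v →
      ∃ p q r, [p, q, r].Sublist ps ∧ k ≤ p.1 + q.1 + r.1 ∧ v = p.2 + q.2 + r.2) ∧
  (∀ p, p ∈ ps → ∀ i, 0 ≤ i → i ≤ p.1 → ∃ v, s1.get? i = some v ∧ p.2 ≤ v) ∧
  (∀ p q, [p, q].Sublist ps → ∃ v, s2.get? (p.1 + q.1) = some v ∧ p.2 + q.2 ≤ v) ∧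
  (∀ p q r, [p, q, r].Sublist ps →
      ∃ v, s3.get? (p.1 + q.1 + r.1) = some v ∧ p.2 + q.2 + r.2 ≤ v)

lemma dinv_solStep (ps : List (Int × Int)) (e : Int × Int)
    (s1 s2 s3 : PySem.Dict Int Int)
    (hnn : ∀ p, p ∈ ps ++ [e] → 0 ≤ p.1 ∧ 0 ≤ p.2)
    (h : DInv ps s1 s2 s3) :
    DInv (ps ++ [e]) (solStep (s1, s2, s3) e).1 (solStep (s1, s2, s3) e).2.1
      (solStep (s1, s2, s3) e).2.2 := by
  obtain ⟨nd1, nd2, nd3, so1, so2, so3, co1, co2, co3⟩ := h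
  have hea : 0 ≤ e.1 := (hnn e (by simp)).1
  have heb : 0 ≤ e.2 := (hnn e (by simp)).2
  have hnn' : ∀ p, p ∈ ps → 0 ≤ p.1 ∧ 0 ≤ p.2 := fun p hp => hnn p (by simp [hp])
  simp only [solStep]
  refine ⟨?_, ?_, ?_, ?_, ?_, ?_, ?_, ?_, ?_⟩
  · exact PySem.Dict.nodup_keys_foldl_insert (PySem.List.pyRange 0 (e.1 + 1) 1)
      (fun d i => max (d.getD i 0) e.2) s1 nd1
  · exact PySem.Dict.nodup_keys_foldl_insert_key s1.items (fun kv => kv.1 + e.1)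
      (fun d kv => max (d.getD (kv.1 + e.1) 0) (s1.getD kv.1 0 + e.2)) s2 nd2
  · exact PySem.Dict.nodup_keys_foldl_insert_key s2.items (fun kv => kv.1 + e.1)
      (fun d kv => max (d.getD (kv.1 + e.1) 0) (s2.getD kv.1 0 + e.2)) s3 nd3
  · -- soundness of seen
    exact foldMax_sound (fun i => i) (fun _ => e.2) (PySem.List.pyRange 0 (e.1 + 1) 1) s1
      (fun k v => ∃ p, p ∈ ps ++ [e] ∧ k ≤ p.1 ∧ v = p.2)
      (by intro k v w hv hw; rcases max_choice v w with h' | h' <;> rw [h'] <;> assumption)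
      (by intro k v hkv
          obtain ⟨p, hp, h1, h2⟩ := so1 k v hkv
          exact ⟨p, by simp [hp], h1, h2⟩)
      (by intro i hi
          have := PySem.List.mem_pyRange_one.mp hi
          exact ⟨e, by simp, by dsimp only; omega, rfl⟩)
      (by intro i _; exact heb)
  · -- soundness of seen2
    exact foldMax_sound (fun kv => kv.1 + e.1) (fun kv => s1.getD kv.1 0 + e.2) s1.items s2
      (fun k v => ∃ p q, [p, q].Sublist (ps ++ [e]) ∧ k ≤ p.1 + q.1 ∧ v = p.2 + q.2)
      (by intro k v w hv hw; rcases max_choice v w with h' | h' <;> rw [h'] <;> assumption)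
      (by intro k v hkv
          obtain ⟨p, q, hsub, h1, h2⟩ := so2 k v hkv
          exact ⟨p, q, hsub.trans (List.sublist_append_left ps [e]), h1, h2⟩)
      (by intro kv hkv
          have hg : s1.get? kv.1 = some kv.2 := PySem.Dict.get?_of_mem_items s1 hkv nd1
          obtain ⟨p, hp, hle, heq⟩ := so1 kv.1 kv.2 hg
          have hgd : s1.getD kv.1 0 = kv.2 := PySem.Dict.getD_of_get?_eq_some s1 0 hg
          refine ⟨p, e, ?_, by dsimp only; omega, by dsimp only; rw [hgd]; omega⟩
          exact (List.singleton_sublist.mpr hp).append (List.Sublist.refl [e]))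
      (by intro kv hkv
          have hg : s1.get? kv.1 = some kv.2 := PySem.Dict.get?_of_mem_items s1 hkv nd1
          obtain ⟨p, hp, hle, heq⟩ := so1 kv.1 kv.2 hg
          have hgd : s1.getD kv.1 0 = kv.2 := PySem.Dict.getD_of_get?_eq_some s1 0 hg
          have := (hnn' p hp).2
          dsimp only; rw [hgd]; omega)
  · -- soundness of seen3
    exact foldMax_sound (fun kv => kv.1 + e.1) (fun kv => s2.getD kv.1 0 + e.2) s2.items s3
      (fun k v => ∃ p q r, [p, q, r].Sublist (ps ++ [e]) ∧ k ≤ p.1 + q.1 + r.1 ∧ v = p.2 + q.2 + r.2)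
      (by intro k v w hv hw; rcases max_choice v w with h' | h' <;> rw [h'] <;> assumption)
      (by intro k v hkv
          obtain ⟨p, q, r, hsub, h1, h2⟩ := so3 k v hkv
          exact ⟨p, q, r, hsub.trans (List.sublist_append_left ps [e]), h1, h2⟩)
      (by intro kv hkv
          have hg : s2.get? kv.1 = some kv.2 := PySem.Dict.get?_of_mem_items s2 hkv nd2
          obtain ⟨p, q, hsub, hle, heq⟩ := so2 kv.1 kv.2 hg
          have hgd : s2.getD kv.1 0 = kv.2 := PySem.Dict.getD_of_get?_eq_some s2 0 hg
          refine ⟨p, q, e, ?_, by dsimp only; omega, by dsimp only; rw [hgd]; omega⟩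
          exact hsub.append (List.Sublist.refl [e]))
      (by intro kv hkv
          have hg : s2.get? kv.1 = some kv.2 := PySem.Dict.get?_of_mem_items s2 hkv nd2
          obtain ⟨p, q, hsub, hle, heq⟩ := so2 kv.1 kv.2 hg
          have h1 := (hnn' p (hsub.subset (by simp))).2
          have h2 := (hnn' q (hsub.subset (by simp))).2
          have hgd : s2.getD kv.1 0 = kv.2 := PySem.Dict.getD_of_get?_eq_some s2 0 hg
          dsimp only; rw [hgd]; omega)
  · -- completeness of seen
    intro p hp i hi0 hile
    rcases List.mem_append.mp hp with hp' | hp'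
    · obtain ⟨v, hv, hle⟩ := co1 p hp' i hi0 hile
      obtain ⟨v', h', hle'⟩ := foldMax_mono (fun i => i) (fun _ => e.2)
        (PySem.List.pyRange 0 (e.1 + 1) 1) s1 i v hv
      exact ⟨v', h', by omega⟩
    · have hpe : p = e := by simpa using hp'
      rw [hpe] at hile ⊢
      have hmem : i ∈ PySem.List.pyRange 0 (e.1 + 1) 1 :=
        PySem.List.mem_pyRange_one.mpr ⟨hi0, by omega⟩
      exact foldMax_hit (fun i => i) (fun _ => e.2)
        (PySem.List.pyRange 0 (e.1 + 1) 1) s1 i hmem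
  · -- completeness of seen2
    intro p q hsub
    rcases pair_sublist_concat hsub with hold | ⟨hp, hqe⟩
    · obtain ⟨v, hv, hle⟩ := co2 p q hold
      obtain ⟨v', h', hle'⟩ := foldMax_mono (fun kv => kv.1 + e.1)
        (fun kv => s1.getD kv.1 0 + e.2) s1.items s2 (p.1 + q.1) v hv
      exact ⟨v', h', by omega⟩
    · rw [hqe]
      have h0p := (hnn' p hp).1
      obtain ⟨w, hw, hle⟩ := co1 p hp p.1 h0p (le_refl _)
      have hmem : (p.1, w) ∈ s1.items := PySem.Dict.mem_items_of_get?_eq_some s1 hw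
      obtain ⟨v', h', hle'⟩ := foldMax_hit (fun kv => kv.1 + e.1)
        (fun kv => s1.getD kv.1 0 + e.2) s1.items s2 (p.1, w) hmem
      have hgd : s1.getD p.1 0 = w := PySem.Dict.getD_of_get?_eq_some s1 0 hw
      exact ⟨v', h', by rw [hgd] at hle'; omega⟩
  · -- completeness of seen3
    intro p q r hsub
    rcases triple_sublist_concat hsub with hold | ⟨hpq, hre⟩
    · obtain ⟨v, hv, hle⟩ := co3 p q r hold
      obtain ⟨v', h', hle'⟩ := foldMax_mono (fun kv => kv.1 + e.1)
        (fun kv => s2.getD kv.1 0 + e.2) s2.items s3 (p.1 + q.1 + r.1) v hv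
      exact ⟨v', h', by omega⟩
    · rw [hre]
      obtain ⟨w, hw, hle⟩ := co2 p q hpq
      have hmem : (p.1 + q.1, w) ∈ s2.items := PySem.Dict.mem_items_of_get?_eq_some s2 hw
      obtain ⟨v', h', hle'⟩ := foldMax_hit (fun kv => kv.1 + e.1)
        (fun kv => s2.getD kv.1 0 + e.2) s2.items s3 (p.1 + q.1, w) hmem
      have hgd : s2.getD (p.1 + q.1) 0 = w := PySem.Dict.getD_of_get?_eq_some s2 0 hw
      exact ⟨v', h', by rw [hgd] at hle'; omega⟩

lemma dinv_foldl (ps : List (Int × Int)) (hnn : ∀ p, p ∈ ps → 0 ≤ p.1 ∧ 0 ≤ p.2) :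
    DInv ps (ps.foldl solStep (PySem.Dict.empty, PySem.Dict.empty, PySem.Dict.empty)).1
      (ps.foldl solStep (PySem.Dict.empty, PySem.Dict.empty, PySem.Dict.empty)).2.1
      (ps.foldl solStep (PySem.Dict.empty, PySem.Dict.empty, PySem.Dict.empty)).2.2 := by
  induction ps using List.reverseRecOn with
  | nil =>
      refine ⟨PySem.Dict.nodup_keys_empty, PySem.Dict.nodup_keys_empty,
        PySem.Dict.nodup_keys_empty, ?_, ?_, ?_, ?_, ?_, ?_⟩ <;>
        simp [PySem.Dict.get?_empty]
  | append_singleton ps e ih =>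
      rw [List.foldl_append]
      simp only [List.foldl_cons, List.foldl_nil]
      exact dinv_solStep ps e _ _ _ hnn (ih (fun p hp => hnn p (by simp [hp])))

-- A's final loop
lemma foldMaxMin_ge_init (L : List (Int × Int)) :
    ∀ init : Int, init ≤ L.foldl (fun res kv => max res (min kv.1 kv.2)) init := by
  induction L with
  | nil => intro init; simp
  | cons y L ih =>
      intro init
      simp only [List.foldl_cons]
      exact le_trans (le_max_left _ _) (ih _)

lemma foldMaxMin_ge_mem (L : List (Int × Int)) (k v : Int) (h : (k, v) ∈ L) :
    ∀ init : Int, min k v ≤ L.foldl (fun res kv => max res (min kv.1 kv.2)) init := by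
  induction L with
  | nil => cases h
  | cons y L ih =>
      intro init
      simp only [List.foldl_cons]
      rcases List.mem_cons.mp h with rfl | h'
      · exact le_trans (le_max_right _ _) (foldMaxMin_ge_init L _)
      · exact ih h' _

lemma foldMaxMin_le (L : List (Int × Int)) (c : Int)
    (h : ∀ kv ∈ L, min kv.1 kv.2 ≤ c) :
    ∀ init : Int, init ≤ c → L.foldl (fun res kv => max res (min kv.1 kv.2)) init ≤ c := by
  induction L with
  | nil => intro init h0; exact h0
  | cons y L ih =>
      intro init h0
      simp only [List.foldl_cons]
      refine ih (fun kv hkv => h kv (List.mem_cons_of_mem y hkv)) _ ?_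
      have := h y List.mem_cons_self
      omega

-- B's recursion: lower and upper characterisation
lemma best3_nonneg (ps : List (Int × Int)) : 0 ≤ best3 ps := by
  induction ps with
  | nil => simp [best3]
  | cons p rest ih => simp only [best3]; omega

lemma best1_ge (p q r : Int × Int) (ps : List (Int × Int)) (h : r ∈ ps) :
    min (p.1 + q.1 + r.1) (p.2 + q.2 + r.2) ≤ best1 p q ps := by
  induction ps with
  | nil => cases h
  | cons r' rest ih =>
      rcases List.mem_cons.mp h with rfl | h'
      · simp only [best1]; omega
      · have := ih h'; simp only [best1]; omega

lemma best1_le (p q : Int × Int) (ps : List (Int × Int)) (c : Int) (h0 : 0 ≤ c)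
    (h : ∀ r ∈ ps, min (p.1 + q.1 + r.1) (p.2 + q.2 + r.2) ≤ c) : best1 p q ps ≤ c := by
  induction ps with
  | nil => simpa [best1] using h0
  | cons r rest ih =>
      have h1 := h r List.mem_cons_self
      have h2 := ih (fun r' hr' => h r' (List.mem_cons_of_mem r hr'))
      simp only [best1]; omega

lemma best2_ge (p q r : Int × Int) (ps : List (Int × Int)) (h : [q, r].Sublist ps) :
    min (p.1 + q.1 + r.1) (p.2 + q.2 + r.2) ≤ best2 p ps := by
  induction ps with
  | nil => simp at h
  | cons x rest ih =>
      cases h with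
      | cons _ h' =>
          have := ih h'; simp only [best2]; omega
      | cons₂ _ h' =>
          have := best1_ge p q r rest (List.singleton_sublist.mp h')
          simp only [best2]; omega

lemma best2_le (p : Int × Int) (ps : List (Int × Int)) (c : Int) (h0 : 0 ≤ c)
    (h : ∀ q r, [q, r].Sublist ps → min (p.1 + q.1 + r.1) (p.2 + q.2 + r.2) ≤ c) :
    best2 p ps ≤ c := by
  induction ps with
  | nil => simpa [best2] using h0
  | cons x rest ih =>
      have h1 : best1 p x rest ≤ c := by
        apply best1_le p x rest c h0
        intro r hr
        exact h x r (List.Sublist.cons₂ x (List.singleton_sublist.mpr hr))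
      have h2 : best2 p rest ≤ c := ih (fun q r hqr => h q r (List.Sublist.cons x hqr))
      simp only [best2]; omega

lemma best3_ge (p q r : Int × Int) (ps : List (Int × Int)) (h : [p, q, r].Sublist ps) :
    min (p.1 + q.1 + r.1) (p.2 + q.2 + r.2) ≤ best3 ps := by
  induction ps with
  | nil => simp at h
  | cons x rest ih =>
      cases h with
      | cons _ h' =>
          have := ih h'; simp only [best3]; omega
      | cons₂ _ h' =>
          have := best2_ge p q r rest h'
          simp only [best3]; omega

lemma best3_le (ps : List (Int × Int)) (c : Int) (h0 : 0 ≤ c)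
    (h : ∀ p q r, [p, q, r].Sublist ps → min (p.1 + q.1 + r.1) (p.2 + q.2 + r.2) ≤ c) :
    best3 ps ≤ c := by
  induction ps with
  | nil => simpa [best3] using h0
  | cons x rest ih =>
      have h1 : best2 x rest ≤ c := by
        apply best2_le x rest c h0
        intro q r hqr
        exact h x q r (List.Sublist.cons₂ x hqr)
      have h2 : best3 rest ≤ c := ih (fun p q r hpqr => h p q r (List.Sublist.cons x hpqr))
      simp only [best3]; omega

-- ===== VERDICT (by name: the statement is the Claim_ definition above) =====
theorem solution_spec : Claim_equal_solution := by
  intro A _hdom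
  show solution A = solution_alt A
  have hnn : ∀ p, p ∈ A.map pows → 0 ≤ p.1 ∧ 0 ≤ p.2 := by
    intro p hp
    rcases List.mem_map.mp hp with ⟨n, _, rfl⟩
    exact pows_nonneg n
  obtain ⟨nd1, nd2, nd3, so1, so2, so3, co1, co2, co3⟩ := dinv_foldl (A.map pows) hnn
  show ((A.map pows).foldl solStep
      (PySem.Dict.empty, PySem.Dict.empty, PySem.Dict.empty)).2.2.items.foldl
      (fun res kv => max res (min kv.1 kv.2)) 0 = best3 (A.map pows)
  apply le_antisymm
  · refine foldMaxMin_le _ _ ?_ 0 (best3_nonneg _)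
    intro kv hkv
    have hg := PySem.Dict.get?_of_mem_items _ hkv nd3
    obtain ⟨p, q, r, hsub, hk, hv⟩ := so3 kv.1 kv.2 hg
    have := best3_ge p q r (A.map pows) hsub
    omega
  · refine best3_le _ _ (foldMaxMin_ge_init _ 0) ?_
    intro p q r hsub
    obtain ⟨v, hget, hle⟩ := co3 p q r hsub
    have hmem := PySem.Dict.mem_items_of_get?_eq_some _ hget
    have h5 := foldMaxMin_ge_mem _ (p.1 + q.1 + r.1) v hmem 0
    omega
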